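-- pv_equiv track=rewrite | github.com/nehakathar1999/Shadowtrace | asset_discovery/correlator/asset_correlator.py | correlate_assets
-- ===== SOURCE A (Python) =====
-- def correlate_assets(assets):
--
--     unique = {}
--
--     for asset in assets:
--
--         mac = asset.get("mac")
--
--         if mac not in unique:
--             unique[mac] = asset
--         else:
--             unique[mac].update(asset)
--
--     return list(unique.values())
-- ===== SOURCE B (Python) =====
-- def correlate_assets(assets):
--     # Repeated partition sweep, no dict: take the first pending asset, fold
--     # every later asset with the same mac into it (in place, via .update),
--     # drop those, and repeat on what is left.
--     merged = []
--     pending = list(assets)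
--     while pending:
--         first = pending[0]
--         mac = first.get("mac")
--         rest = pending[1:]
--         for other in rest:
--             if other.get("mac") == mac:
--                 first.update(other)
--         pending = [a for a in rest if a.get("mac") != mac]
--         merged.append(first)
--     return merged
-- ===== Notes on version B (the rewrite author's own statement) =====
-- stated objective: alternative
-- what changed: A does a single pass inserting/merging into a hash dict keyed by mac; B uses no dict at all: it repeatedly takes the first remaining asset, sweeps the rest merging every same-mac asset into it in place, filters those out, and repeats (selection/partition sweeps).
import Mathlib
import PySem

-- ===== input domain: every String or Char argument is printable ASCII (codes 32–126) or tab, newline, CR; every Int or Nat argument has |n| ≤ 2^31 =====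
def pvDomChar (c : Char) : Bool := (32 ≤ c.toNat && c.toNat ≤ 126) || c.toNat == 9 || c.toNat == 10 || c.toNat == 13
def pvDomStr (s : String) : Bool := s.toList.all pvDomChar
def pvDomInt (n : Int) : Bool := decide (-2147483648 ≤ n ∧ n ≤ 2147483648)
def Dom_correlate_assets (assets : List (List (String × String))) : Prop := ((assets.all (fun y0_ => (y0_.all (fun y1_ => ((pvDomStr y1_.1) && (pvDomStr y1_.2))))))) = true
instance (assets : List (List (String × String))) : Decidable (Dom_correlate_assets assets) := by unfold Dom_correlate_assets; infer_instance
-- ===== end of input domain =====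

-- B is dict-free: repeated partition sweeps (select first pending asset, merge all
-- later same-mac assets into it in place, filter them out, repeat) instead of A's
-- single pass into a mac-keyed dict; objective: alternative (same mutation of the
-- first asset of each mac group in place, so argument mutation matches A's too).

-- shared helper: Python's `d.update(other)` on a dict `d` (both sources call it)
def pvUpd (cur asset : List (String × String)) : List (String × String) :=
  (PySem.Dict.update (PySem.Dict.mk cur) asset).items

-- shared helper: `asset.get("mac")`
def pvMac (asset : List (String × String)) : Option String :=
  (PySem.Dict.mk asset).get? "mac"

-- ===== PORT A =====
-- loop body of A: `mac = asset.get("mac"); if mac not in unique: unique[mac] = asset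
-- else: unique[mac].update(asset)`
def pvStepA (u : PySem.Dict (Option String) (List (String × String)))
    (asset : List (String × String)) : PySem.Dict (Option String) (List (String × String)) :=
  if !(u.contains (pvMac asset)) then u.insert (pvMac asset) asset
  else u.modify (pvMac asset) [] (fun cur => pvUpd cur asset)

def correlate_assets (assets : List (List (String × String))) : List (List (String × String)) :=
  (assets.foldl pvStepA PySem.Dict.empty).values

-- ===== PORT B =====
-- the `while pending:` loop of B: `first = pending[0]; mac = first.get("mac");
-- for other in rest: if other.get("mac") == mac: first.update(other);
-- pending = [a for a in rest if a.get("mac") != mac]; merged.append(first)`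
def pvSweep (pending : List (List (String × String))) : List (List (String × String)) :=
  match pending with
  | [] => []
  | first :: rest =>
      let mac := pvMac first
      let merged := rest.foldl
        (fun f other => if pvMac other == mac then pvUpd f other else f) first
      merged :: pvSweep (rest.filter (fun a => !(pvMac a == mac)))
termination_by pending.length
decreasing_by
  simp only [List.length_cons, List.length_unattach]
  exact Nat.lt_succ_of_le (le_trans (List.length_filter_le _ _) (by simp))

def correlate_assets_alt (assets : List (List (String × String))) : List (List (String × String)) :=
  pvSweep assets

-- ===== PRECONDITION & SPEC =====
def Spec_correlate_assets (assets : List (List (String × String))) (out : List (List (String × String))) : Prop := out = correlate_assets_alt assets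
instance (assets : List (List (String × String))) (out : List (List (String × String))) : Decidable (Spec_correlate_assets assets out) := by unfold Spec_correlate_assets; infer_instance

-- ===== CLAIM (what is proved, stated in full; the proofs are below) =====
def Claim_equal_correlate_assets : Prop := ∀ (assets : List (List (String × String))), Dom_correlate_assets assets → Spec_correlate_assets assets (correlate_assets assets)

-- ===== LEMMAS AND PROOFS =====

-- `find?` past an inserted pair with a different key
lemma pv_get?_mk_insertIdx (l : List ((Option String) × List (String × String)))
    (idx : Nat) (m k : Option String) (v : List (String × String)) (hk : ¬ (m == k) = true) :
    (PySem.Dict.mk (l.insertIdx idx (m, v))).get? k = (PySem.Dict.mk l).get? k := by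
  induction l generalizing idx with
  | nil =>
      cases idx with
      | zero => simp [PySem.Dict.get?, List.find?, hk]
      | succ j => simp [List.insertIdx]
  | cons p r ih =>
      cases idx with
      | zero => simp [PySem.Dict.get?, List.insertIdx, hk, List.find?]
      | succ j =>
          simp only [List.insertIdx_succ_cons]
          by_cases hp : (p.1 == k) = true
          · simp [PySem.Dict.get?, List.find?, hp]
          · simp only [PySem.Dict.get?, List.find?, hp] at ih ⊢
            simpa using ih j

-- contains over an inserted pair
lemma pv_contains_mk_insertIdx (l : List ((Option String) × List (String × String)))
    (idx : Nat) (m k : Option String) (v : List (String × String)) (hidx : idx ≤ l.length) :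
    (PySem.Dict.mk (l.insertIdx idx (m, v))).contains k
      = ((m == k) || (PySem.Dict.mk l).contains k) := by
  simp only [PySem.Dict.contains]
  induction l generalizing idx with
  | nil =>
      have h0 : idx = 0 := by simpa using hidx
      subst h0
      simp [List.insertIdx]
  | cons p r ih =>
      cases idx with
      | zero => simp [List.insertIdx, List.any_cons]
      | succ j =>
          have hj : j ≤ r.length := by simpa using hidx
          simp only [List.insertIdx_succ_cons, List.any_cons, ih j hj]
          cases p.1 == k <;> cases m == k <;> simp

-- keys of a fresh-m dict are untouched by a map that rewrites key k
lemma pv_map_keep (l : List ((Option String) × List (String × String)))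
    (k : Option String) (q : (Option String) × List (String × String))
    (h : l.any (fun p => p.1 == k) = false) :
    l.map (fun p => if (p.1 == k) = true then q else p) = l := by
  simp only [List.any_eq_false] at h
  calc l.map (fun p => if (p.1 == k) = true then q else p) = l.map id := by
        apply List.map_congr_left
        intro p hp
        simp [h p hp]
    _ = l := List.map_id l
-- lookup of the freshly inserted key m itself
lemma pv_get?_mk_insertIdx_self (l : List ((Option String) × List (String × String)))
    (idx : Nat) (m : Option String) (v : List (String × String))
    (h : l.any (fun p => p.1 == m) = false) (hidx : idx ≤ l.length) :
    (PySem.Dict.mk (l.insertIdx idx (m, v))).get? m = some v := by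
  induction l generalizing idx with
  | nil =>
      have h0 : idx = 0 := by simpa using hidx
      subst h0
      simp [PySem.Dict.get?, List.insertIdx]
  | cons p r ih =>
      simp only [List.any_cons, Bool.or_eq_false_iff] at h
      cases idx with
      | zero => simp [List.insertIdx, PySem.Dict.get?]
      | succ j =>
          have hj : j ≤ r.length := by simpa using hidx
          simp only [List.insertIdx_succ_cons, PySem.Dict.get?, List.find?, h.1]
          exact ih j h.2 hj
-- insertIdx into the left part of an append
lemma pv_insertIdx_append {α : Type} (l1 l2 : List α) (idx : Nat) (a : α)
    (hidx : idx ≤ l1.length) :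
    (l1 ++ l2).insertIdx idx a = l1.insertIdx idx a ++ l2 := by
  induction l1 generalizing idx with
  | nil =>
      have h0 : idx = 0 := by simpa using hidx
      subst h0
      simp [List.insertIdx]
  | cons x r ih =>
      cases idx with
      | zero => simp [List.insertIdx]
      | succ j =>
          have hj : j ≤ r.length := by simpa using hidx
          simp [List.insertIdx_succ_cons, ih j hj]
-- one A-step changes containment only by the asset's own mac
lemma pv_stepA_contains (u : PySem.Dict (Option String) (List (String × String)))
    (a : List (String × String)) (m : Option String) :
    (pvStepA u a).contains m = ((pvMac a == m) || u.contains m) := by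
  have hsymm : (m == pvMac a) = (pvMac a == m) := by
    by_cases h : m = pvMac a <;> simp [h, Ne.symm]
  unfold pvStepA PySem.Dict.modify
  split <;> simp [PySem.Dict.contains_insert, hsymm]
-- one A-step never shrinks the dict
lemma pv_stepA_len (u : PySem.Dict (Option String) (List (String × String)))
    (a : List (String × String)) :
    u.items.length ≤ (pvStepA u a).items.length := by
  unfold pvStepA PySem.Dict.modify PySem.Dict.insert
  split <;> split <;> simp

-- the EXTRACTION invariant: a dict that is `u` with one extra fresh entry (m, v)
-- inserted at position idx evolves under A's loop into the filtered fold of u with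
-- (m, group-merged v) still at position idx.
lemma pv_extract (rest : List (List (String × String))) :
    ∀ (u : PySem.Dict (Option String) (List (String × String)))
      (m : Option String) (v : List (String × String)) (idx : Nat),
      u.contains m = false → idx ≤ u.items.length →
      (List.foldl pvStepA (PySem.Dict.mk (u.items.insertIdx idx (m, v))) rest).items
        = ((List.foldl pvStepA u (rest.filter (fun a => !(pvMac a == m)))).items).insertIdx idx
            (m, (rest.filter (fun a => pvMac a == m)).foldl pvUpd v) := by
  induction rest with
  | nil => intro u m v idx _ _; simp
  | cons a rest ih =>
      intro u m v idx hm hidx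
      have hmkeys : u.items.any (fun p => p.1 == m) = false := hm
      have hw : (PySem.Dict.mk (u.items.insertIdx idx (m, v))).contains (pvMac a)
          = ((m == pvMac a) || u.contains (pvMac a)) :=
        pv_contains_mk_insertIdx u.items idx m (pvMac a) v hidx
      by_cases hk : (pvMac a == m) = true
      · -- same mac as the extracted entry: the m-slot is updated in place
        have hkm : pvMac a = m := by simpa using hk
        have hmk : (m == pvMac a) = true := by simp [hkm]
        have hcont : (PySem.Dict.mk (u.items.insertIdx idx (m, v))).contains (pvMac a) = true := by
          simp [hw, hmk]
        have hstep : pvStepA (PySem.Dict.mk (u.items.insertIdx idx (m, v))) a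
            = PySem.Dict.mk (u.items.insertIdx idx (m, pvUpd v a)) := by
          unfold pvStepA PySem.Dict.modify
          rw [hcont]
          simp only [Bool.not_true, Bool.false_eq_true, if_false]
          have hget : (PySem.Dict.mk (u.items.insertIdx idx (m, v))).getD (pvMac a) [] = v := by
            rw [PySem.Dict.getD_eq_get?_getD, hkm,
              pv_get?_mk_insertIdx_self u.items idx m v hmkeys hidx]
            rfl
          rw [hget]
          apply PySem.Dict.ext
          rw [PySem.Dict.items_insert_of_contains _ _ hcont]
          rw [hkm, List.map_insertIdx]
          simp only [BEq.rfl, if_true]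
          rw [pv_map_keep u.items m (m, pvUpd v a) hmkeys]
        simp only [List.foldl_cons, hstep, List.filter_cons, hk,
          Bool.not_true, if_true, List.foldl_cons]
        exact ih u m (pvUpd v a) idx hm hidx
      · -- different mac: the step acts on the u-part only
        have hk' : (pvMac a == m) = false := by simpa using hk
        have hmk : (m == pvMac a) = false := by
          by_cases h : m = pvMac a
          · exfalso; apply hk; simp [h]
          · simp [h]
        have hm' : (pvStepA u a).contains m = false := by
          rw [pv_stepA_contains, hk', hm]
          rfl
        by_cases hc : u.contains (pvMac a) = true
        · -- existing key in u: in-place rewrite commutes with the inserted entry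
          have hcont : (PySem.Dict.mk (u.items.insertIdx idx (m, v))).contains (pvMac a) = true := by
            simp [hw, hmk, hc]
          have hget : (PySem.Dict.mk (u.items.insertIdx idx (m, v))).get? (pvMac a)
              = u.get? (pvMac a) :=
            pv_get?_mk_insertIdx u.items idx m (pvMac a) v (by simp [hmk])
          have hstep : pvStepA (PySem.Dict.mk (u.items.insertIdx idx (m, v))) a
              = PySem.Dict.mk ((pvStepA u a).items.insertIdx idx (m, v)) := by
            unfold pvStepA PySem.Dict.modify
            rw [hcont, hc]
            simp only [Bool.not_true, Bool.false_eq_true, if_false]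
            apply PySem.Dict.ext
            rw [PySem.Dict.items_insert_of_contains _ _ hcont,
              PySem.Dict.items_insert_of_contains _ _ hc]
            simp only [PySem.Dict.getD_eq_get?_getD, hget]
            rw [List.map_insertIdx]
            simp only [hmk, Bool.false_eq_true, if_false]
          have hlen : idx ≤ (pvStepA u a).items.length :=
            le_trans hidx (pv_stepA_len u a)
          simp only [List.foldl_cons, hstep, List.filter_cons, hk',
            Bool.not_false, if_true, Bool.false_eq_true, if_false, List.foldl_cons]
          exact ih (pvStepA u a) m v idx hm' hlen
        · -- fresh key: both dicts append it at the end
          have hcf : u.contains (pvMac a) = false := by simpa using hc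
          have hcont : (PySem.Dict.mk (u.items.insertIdx idx (m, v))).contains (pvMac a) = false := by
            simp [hw, hmk, hcf]
          have hstep : pvStepA (PySem.Dict.mk (u.items.insertIdx idx (m, v))) a
              = PySem.Dict.mk ((pvStepA u a).items.insertIdx idx (m, v)) := by
            unfold pvStepA
            rw [hcont, hcf]
            simp only [Bool.not_false, if_true]
            apply PySem.Dict.ext
            rw [PySem.Dict.items_insert_of_not_contains _ _ hcont,
              PySem.Dict.items_insert_of_not_contains _ _ hcf]
            rw [pv_insertIdx_append u.items _ idx (m, v) hidx]
          have hlen : idx ≤ (pvStepA u a).items.length :=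
            le_trans hidx (pv_stepA_len u a)
          simp only [List.foldl_cons, hstep, List.filter_cons, hk',
            Bool.not_false, if_true, Bool.false_eq_true, if_false, List.foldl_cons]
          exact ih (pvStepA u a) m v idx hm' hlen

-- A's fold, started from the empty dict, computes exactly B's partition sweeps
lemma pv_sweep_eq : ∀ (n : Nat) (assets : List (List (String × String))),
    assets.length ≤ n →
    (assets.foldl pvStepA PySem.Dict.empty).values = pvSweep assets := by
  intro n
  induction n with
  | zero =>
      intro assets h
      have h0 : assets = [] := List.length_eq_zero_iff.mp (Nat.le_zero.mp h)
      subst h0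
      simp [pvSweep, PySem.Dict.empty, PySem.Dict.values]
  | succ n ih =>
      intro assets h
      match assets with
      | [] => simp [pvSweep, PySem.Dict.empty, PySem.Dict.values]
      | first :: rest =>
          have hstep : pvStepA PySem.Dict.empty first
              = PySem.Dict.mk ((PySem.Dict.empty.items).insertIdx 0 (pvMac first, first)) := by
            unfold pvStepA
            rw [PySem.Dict.contains_empty]
            simp [PySem.Dict.insert, PySem.Dict.contains, PySem.Dict.empty, List.insertIdx]
          have hx := pv_extract rest PySem.Dict.empty (pvMac first) first 0
            (PySem.Dict.contains_empty _) (by simp [PySem.Dict.empty])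
          have hrest : (rest.filter (fun a => !(pvMac a == pvMac first))).length ≤ n :=
            le_trans (List.length_filter_le _ _) (by simpa using h)
          rw [pvSweep]
          rw [List.foldl_cons, hstep]
          have hvals : (List.foldl pvStepA
              (PySem.Dict.mk ((PySem.Dict.empty.items).insertIdx 0 (pvMac first, first))) rest).values
              = ((rest.filter (fun a => pvMac a == pvMac first)).foldl pvUpd first)
                :: (List.foldl pvStepA PySem.Dict.empty
                      (rest.filter (fun a => !(pvMac a == pvMac first)))).values := by
            simp only [PySem.Dict.values]
            rw [hx]
            rfl
          rw [hvals, ih _ hrest, List.foldl_filter]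

-- ===== VERDICT (by name: the statement is the Claim_ definition above) =====
theorem correlate_assets_spec : Claim_equal_correlate_assets := by
  intro assets _
  unfold Spec_correlate_assets correlate_assets correlate_assets_alt
  exact pv_sweep_eq assets.length assets le_rfl
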